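-- pv_equiv track=rewrite | github.com/faizfhri/Projek-UAS-Kriptografi | app.py | spiral_encrypt
-- ===== SOURCE A (Python) =====
-- import math
--
-- def orde(text):
--     panjang = len(text)
--     ukuran = math.ceil(math.sqrt(panjang))
--     if ukuran % 2 == 0:
--         ukuran += 1  # Pastikan ukuran matriks ganjil
--     return ukuran
--
-- def cek(text):
--     i = orde(text)
--     return (i * i) - len(text)
--
-- def encrypt_padding(teks, kurang):
--     return teks + 'x' * kurang
--
-- def spiral_encrypt(arr):
--     O = orde(arr)
--     padding_length = cek(arr)
--     padded_text = encrypt_padding(arr, padding_length)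
--
--     # Membuat matriks untuk enkripsi spiral
--     matrix = [[None] * O for _ in range(O)]
--     top, bottom, left, right = 0, O - 1, 0, O - 1
--     index = 0
--
--     while True:
--         if left > right:
--             break
--
--         # Isi baris atas dari kiri ke kanan
--         for i in range(left, right + 1):
--             matrix[top][i] = padded_text[index]
--             index += 1
--         top += 1
--
--         if top > bottom:
--             break
--
--         # Isi kolom kanan dari atas ke bawah
--         for i in range(top, bottom + 1):
--             matrix[i][right] = padded_text[index]
--             index += 1
--         right -= 1
--
--         if left > right:
--             break
--
--         # Isi baris bawah dari kanan ke kiri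
--         for i in range(right, left - 1, -1):
--             matrix[bottom][i] = padded_text[index]
--             index += 1
--         bottom -= 1
--
--         if top > bottom:
--             break
--
--         # Isi kolom kiri dari bawah ke atas
--         for i in range(bottom, top - 1, -1):
--             matrix[i][left] = padded_text[index]
--             index += 1
--         left += 1
--
--     # Gabungkan hasil spiral menjadi satu string
--     result = ''.join(''.join(row) for row in matrix)
--     return result
-- ===== SOURCE B (Python) =====
-- import math
--
-- def spiral_encrypt(arr):
--     # same odd size as A's orde(): n = ceil(sqrt(len)) rounded up to odd
--     n = math.isqrt(len(arr))
--     if n * n < len(arr):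
--         n += 1
--     if n % 2 == 0:
--         n += 1
--     padded = arr + 'x' * (n * n - len(arr))
--     # walk the spiral by segment lengths: n, n-1, n-1, n-2, n-2, ..., 1, 1
--     lengths = [n] + [m for k in range(n - 1, 0, -1) for m in (k, k)]
--     dirs = [(0, 1), (1, 0), (0, -1), (-1, 0)]
--     flat = [None] * (n * n)
--     r = c = 0
--     d = 0
--     idx = 0
--     for L in lengths:
--         dr, dc = dirs[d]
--         for _ in range(L):
--             flat[r * n + c] = padded[idx]
--             idx += 1
--             r += dr
--             c += dc
--         # step back from the overshoot, turn, and step into the next segment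
--         r -= dr
--         c -= dc
--         d = (d + 1) % 4
--         dr, dc = dirs[d]
--         r += dr
--         c += dc
--     return ''.join(flat)
-- ===== Notes on version B (the rewrite author's own statement) =====
-- stated objective: alternative
-- what changed: Replaces the four-boundary-loop matrix fill (top/bottom/left/right shrinking with break checks) by a single direction-turning walk over a precomputed segment-length sequence [n, n-1, n-1, n-2, n-2, ..., 1, 1] writing into one flat row-major buffer.
import Mathlib
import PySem

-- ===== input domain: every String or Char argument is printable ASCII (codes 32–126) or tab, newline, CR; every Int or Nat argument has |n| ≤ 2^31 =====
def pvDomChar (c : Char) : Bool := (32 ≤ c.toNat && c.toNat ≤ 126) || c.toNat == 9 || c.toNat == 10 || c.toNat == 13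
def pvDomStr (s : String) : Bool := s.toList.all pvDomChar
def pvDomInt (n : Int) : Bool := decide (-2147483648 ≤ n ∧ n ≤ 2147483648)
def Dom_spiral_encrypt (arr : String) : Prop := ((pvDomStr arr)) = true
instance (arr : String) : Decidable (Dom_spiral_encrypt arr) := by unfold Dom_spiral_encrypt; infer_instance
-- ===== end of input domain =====

-- B replaces A's four-boundary-loop matrix fill by a single direction-turning walk over the
-- segment-length sequence [n, n-1, n-1, n-2, n-2, ..., 1, 1] into a flat row-major buffer ("alternative").

-- ===== PORT A =====
-- padded_text[index]: index is always within range when executed (exactly n*n characters are placed)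
def pvCharAt (s : String) (i : Int) : Char := (PySem.Str.pyGet? s i).getD ' '

-- orde: math.ceil(math.sqrt(panjang)) ported via Nat.sqrt — exact, since float sqrt is correctly
-- rounded and these lengths are far below 2^52
def pvOrde (text : String) : Int :=
  let panjang := text.toList.length
  let s := Nat.sqrt panjang
  let ukuran : Int := if s * s = panjang then (s : Int) else (s : Int) + 1
  if PySem.Int.mod ukuran 2 = 0 then ukuran + 1 else ukuran

def pvCek (text : String) : Int :=
  let i := pvOrde text
  i * i - text.toList.length

def pvEncryptPadding (teks : String) (kurang : Int) : String :=
  teks ++ String.ofList (List.replicate kurang.toNat 'x')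

-- matrix[r][c] = v; r and c are provably nonnegative and in range wherever this is executed
def pvSetCell (m : List (List (Option Char))) (r c : Int) (v : Char) : List (List (Option Char)) :=
  m.set r.toNat ((m.getD r.toNat []).set c.toNat (some v))

-- body of "for i in …: matrix[row][i] = padded_text[index]; index += 1"
def pvRowWrite (padded : String) (row : Int) (p : List (List (Option Char)) × Int) (i : Int) :
    List (List (Option Char)) × Int :=
  (pvSetCell p.1 row i (pvCharAt padded p.2), p.2 + 1)

-- body of "for i in …: matrix[i][col] = padded_text[index]; index += 1"
def pvColWrite (padded : String) (col : Int) (p : List (List (Option Char)) × Int) (i : Int) :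
    List (List (Option Char)) × Int :=
  (pvSetCell p.1 i col (pvCharAt padded p.2), p.2 + 1)

-- the "while True" loop; fuel bounds the number of passes (each pass increases left, so
-- O.toNat + 1 passes always suffice — the fuel is never exhausted on a real run)
def pvLoopA (padded : String) : Nat → List (List (Option Char)) → Int → Int → Int → Int → Int →
    List (List (Option Char))
  | 0, m, _, _, _, _, _ => m
  | fuel+1, m, idx, top, bottom, left, right =>
    if left > right then m else
    let p := (PySem.List.pyRange left (right+1) 1).foldl (pvRowWrite padded top) (m, idx)
    let top := top + 1
    if top > bottom then p.1 else
    let q := (PySem.List.pyRange top (bottom+1) 1).foldl (pvColWrite padded right) (p.1, p.2)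
    let right := right - 1
    if left > right then q.1 else
    let u := (PySem.List.pyRange right (left-1) (-1)).foldl (pvRowWrite padded bottom) (q.1, q.2)
    let bottom := bottom - 1
    if top > bottom then u.1 else
    let v := (PySem.List.pyRange bottom (top-1) (-1)).foldl (pvColWrite padded left) (u.1, u.2)
    let left := left + 1
    pvLoopA padded fuel v.1 v.2 top bottom left right

def spiral_encrypt (arr : String) : String :=
  let O := pvOrde arr
  let padding_length := pvCek arr
  let padded_text := pvEncryptPadding arr padding_length
  let matrix := List.replicate O.toNat (List.replicate O.toNat (none : Option Char))
  let mfin := pvLoopA padded_text (O.toNat + 1) matrix 0 0 (O-1) 0 (O-1)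
  -- ''.join(''.join(row) for row in matrix): on a real run every cell has been written, so no
  -- None remains and filterMap id is exact
  String.ofList ((mfin.map (fun row => row.filterMap id)).flatten)

-- ===== PORT B =====
def pvDirs : List (Int × Int) := [(0,1), (1,0), (0,-1), (-1,0)]

-- body of "for _ in range(L): flat[r*n+c] = padded[idx]; idx += 1; r += dr; c += dc"
-- (r*n+c is provably nonnegative and in range wherever this is executed)
def pvInnerB (padded : String) (n dr dc : Int) (q : List (Option Char) × Int × Int × Int)
    (_i : Int) : List (Option Char) × Int × Int × Int :=
  (q.1.set (q.2.1 * n + q.2.2.1).toNat (some (pvCharAt padded q.2.2.2)),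
   q.2.1 + dr, q.2.2.1 + dc, q.2.2.2 + 1)

-- body of "for L in lengths: …" — place a segment, step back, turn, step into the next segment
def pvStepB (padded : String) (n : Int) (st : List (Option Char) × Int × Int × Int × Int)
    (L : Int) : List (Option Char) × Int × Int × Int × Int :=
  let dd := (PySem.List.pyGet? pvDirs st.2.2.2.1).getD (0, 0)   -- d is always 0..3 here
  let q := (PySem.List.pyRange 0 L 1).foldl (pvInnerB padded n dd.1 dd.2)
            (st.1, st.2.1, st.2.2.1, st.2.2.2.2)
  let d2 := PySem.Int.mod (st.2.2.2.1 + 1) 4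
  let dd2 := (PySem.List.pyGet? pvDirs d2).getD (0, 0)
  (q.1, q.2.1 - dd.1 + dd2.1, q.2.2.1 - dd.2 + dd2.2, d2, q.2.2.2)

def spiral_encrypt_alt (arr : String) : String :=
  let len := arr.toList.length
  let s := Nat.sqrt len                                   -- math.isqrt (exact)
  let n0 : Int := if s * s < len then (s : Int) + 1 else (s : Int)
  let n : Int := if PySem.Int.mod n0 2 = 0 then n0 + 1 else n0
  let padded := arr ++ String.ofList (List.replicate (n * n - len).toNat 'x')
  let lengths : List Int := n :: (PySem.List.pyRange (n-1) 0 (-1)).flatMap (fun k => [k, k])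
  let flat0 : List (Option Char) := List.replicate (n * n).toNat (none : Option Char)
  let st := lengths.foldl (pvStepB padded n) (flat0, 0, 0, 0, 0)
  -- ''.join(flat): every cell has been written, so no None remains and filterMap id is exact
  String.ofList (st.1.filterMap id)

-- ===== PRECONDITION & SPEC =====
def Spec_spiral_encrypt (arr : String) (out : String) : Prop := out = spiral_encrypt_alt arr
instance (arr : String) (out : String) : Decidable (Spec_spiral_encrypt arr out) := by unfold Spec_spiral_encrypt; infer_instance

-- ===== CLAIM (what is proved, stated in full; the proofs are below) =====
def Claim_equal_spiral_encrypt : Prop := ∀ (arr : String), Dom_spiral_encrypt arr → Spec_spiral_encrypt arr (spiral_encrypt arr)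

-- ===== LEMMAS AND PROOFS =====

-- write the characters f idx, f (idx+1), … along a coordinate list into a matrix
def pvW2 (f : Int → Char) : List (Int × Int) → List (List (Option Char)) → Int →
    List (List (Option Char))
  | [], m, _ => m
  | (r, c) :: rest, m, idx => pvW2 f rest (pvSetCell m r c (f idx)) (idx + 1)

-- the same, into a flat row-major buffer of width n
def pvW1 (f : Int → Char) (n : Int) : List (Int × Int) → List (Option Char) → Int →
    List (Option Char)
  | [], fl, _ => fl
  | (r, c) :: rest, fl, idx => pvW1 f n rest (fl.set (r * n + c).toNat (some (f idx))) (idx + 1)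

-- straight segment of k cells from (r,c) in direction (dr,dc)
def pvSeg (r c dr dc : Int) : Nat → List (Int × Int)
  | 0 => []
  | k+1 => (r, c) :: pvSeg (r + dr) (c + dc) dr dc k

-- the cell sequence A's loop writes, in order
def pvCoordsA : Nat → Int → Int → Int → Int → List (Int × Int)
  | 0, _, _, _, _ => []
  | fuel+1, top, bottom, left, right =>
    if left > right then [] else
    let s1 := (PySem.List.pyRange left (right+1) 1).map (fun i => (top, i))
    if top + 1 > bottom then s1 else
    let s2 := (PySem.List.pyRange (top+1) (bottom+1) 1).map (fun i => (i, right))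
    if left > right - 1 then s1 ++ s2 else
    let s3 := (PySem.List.pyRange (right-1) (left-1) (-1)).map (fun i => (bottom, i))
    if top + 1 > bottom - 1 then s1 ++ s2 ++ s3 else
    let s4 := (PySem.List.pyRange (bottom-1) top (-1)).map (fun i => (i, left))
    s1 ++ s2 ++ s3 ++ s4 ++ pvCoordsA fuel (top+1) (bottom-1) (left+1) (right-1)

-- the cell sequence B's walk writes, in order
def pvCoordsW : List Int → Int → Int → Int → List (Int × Int)
  | [], _, _, _ => []
  | L :: rest, r, c, d =>
    let dd := (PySem.List.pyGet? pvDirs d).getD (0, 0)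
    let k := L.toNat
    let d2 := PySem.Int.mod (d + 1) 4
    let dd2 := (PySem.List.pyGet? pvDirs d2).getD (0, 0)
    pvSeg r c dd.1 dd.2 k ++
      pvCoordsW rest (r + (k : Int) * dd.1 - dd.1 + dd2.1) (c + (k : Int) * dd.2 - dd.2 + dd2.2) d2

def pvLens (n : Int) : List Int := n :: (PySem.List.pyRange (n-1) 0 (-1)).flatMap (fun k => [k, k])

theorem pvLens_step (n : Int) (h : 3 ≤ n) :
    pvLens n = [n, n-1, n-1, n-2] ++ pvLens (n-2) := by
  unfold pvLens
  rw [PySem.List.pyRange_neg_one_cons (by omega), PySem.List.pyRange_neg_one_cons (by omega)]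
  have h1 : n - 1 - 1 = n - 2 := by ring
  have h2 : n - 1 - 1 - 1 = n - 2 - 1 := by ring
  simp [List.flatMap_cons, h1]


-- ==== mechanical loop→writeAll lemmas ====
theorem pvRowWrite_foldl (pad : String) (t : Int) (li : List Int) :
    ∀ (m : List (List (Option Char))) (idx : Int),
      li.foldl (pvRowWrite pad t) (m, idx) =
        (pvW2 (pvCharAt pad) (li.map (fun i => (t, i))) m idx, idx + li.length) := by
  induction li with
  | nil => intro m idx; simp [pvW2]
  | cons x tl ih =>
    intro m idx
    simp only [List.foldl_cons, List.map_cons, pvW2, pvRowWrite, ih, List.length_cons]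
    simp only [Prod.mk.injEq, true_and]
    push_cast; ring


theorem pvColWrite_foldl (pad : String) (r : Int) (li : List Int) :
    ∀ (m : List (List (Option Char))) (idx : Int),
      li.foldl (pvColWrite pad r) (m, idx) =
        (pvW2 (pvCharAt pad) (li.map (fun i => (i, r))) m idx, idx + li.length) := by
  induction li with
  | nil => intro m idx; simp [pvW2]
  | cons x tl ih =>
    intro m idx
    simp only [List.foldl_cons, List.map_cons, pvW2, pvColWrite, ih, List.length_cons]
    simp only [Prod.mk.injEq, true_and]
    push_cast; ring


theorem pvInnerB_foldl (pad : String) (n dr dc : Int) (li : List Int) :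
    ∀ (fl : List (Option Char)) (r c idx : Int),
      li.foldl (pvInnerB pad n dr dc) (fl, r, c, idx) =
        (pvW1 (pvCharAt pad) n (pvSeg r c dr dc li.length) fl idx,
         r + li.length * dr, c + li.length * dc, idx + li.length) := by
  induction li with
  | nil => intro fl r c idx; simp [pvW1, pvSeg]
  | cons x tl ih =>
    intro fl r c idx
    simp only [List.foldl_cons, List.length_cons, pvInnerB, pvSeg, pvW1, ih]
    simp only [Prod.mk.injEq, true_and]
    refine ⟨by push_cast; ring, by push_cast; ring, by push_cast; ring⟩


theorem pvW2_append (f : Int → Char) (xs ys : List (Int × Int)) :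
    ∀ (m : List (List (Option Char))) (idx : Int),
      pvW2 f (xs ++ ys) m idx = pvW2 f ys (pvW2 f xs m idx) (idx + xs.length) := by
  induction xs with
  | nil => intro m idx; simp [pvW2]
  | cons x tl ih =>
    intro m idx
    obtain ⟨r, c⟩ := x
    simp only [List.cons_append, pvW2, ih, List.length_cons]
    congr 1
    push_cast; ring


theorem pvW1_append (f : Int → Char) (n : Int) (xs ys : List (Int × Int)) :
    ∀ (fl : List (Option Char)) (idx : Int),
      pvW1 f n (xs ++ ys) fl idx = pvW1 f n ys (pvW1 f n xs fl idx) (idx + xs.length) := by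
  induction xs with
  | nil => intro fl idx; simp [pvW1]
  | cons x tl ih =>
    intro fl idx
    obtain ⟨r, c⟩ := x
    simp only [List.cons_append, pvW1, ih, List.length_cons]
    congr 1
    push_cast; ring


theorem pvSeg_length (dr dc : Int) (k : Nat) : ∀ (r c : Int), (pvSeg r c dr dc k).length = k := by
  induction k with
  | zero => intro r c; rfl
  | succ k ih => intro r c; simp [pvSeg, ih]

theorem pvLoopA_eq (pad : String) :
    ∀ (fuel : Nat) (m : List (List (Option Char))) (idx t b l r : Int),
      pvLoopA pad fuel m idx t b l r = pvW2 (pvCharAt pad) (pvCoordsA fuel t b l r) m idx := by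
  intro fuel
  induction fuel with
  | zero => intro m idx t b l r; simp [pvLoopA, pvCoordsA, pvW2]
  | succ fuel ih =>
    intro m idx t b l r
    rw [pvLoopA, pvCoordsA]
    by_cases h1 : l > r
    · simp [h1, pvW2]
    · by_cases h2 : t + 1 > b
      · simp [h1, h2, pvRowWrite_foldl]
      · by_cases h3 : l > r - 1
        · simp [h1, h2, h3, pvRowWrite_foldl, pvColWrite_foldl, pvW2_append, List.length_map,
            PySem.List.length_pyRange_one]
        · by_cases h4 : t + 1 > b - 1
          · simp [h1, h2, h3, h4, pvRowWrite_foldl, pvColWrite_foldl, pvW2_append,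
              List.length_map, PySem.List.length_pyRange_one]
          · simp [h1, h2, h3, h4, pvRowWrite_foldl, pvColWrite_foldl, pvW2_append,
              List.length_map, PySem.List.length_pyRange_one, PySem.List.length_pyRange_neg_one, ih]


theorem pvStepB_foldl (pad : String) (n : Int) (lens : List Int) :
    ∀ (fl : List (Option Char)) (r c d idx : Int),
      (lens.foldl (pvStepB pad n) (fl, r, c, d, idx)).1 =
        pvW1 (pvCharAt pad) n (pvCoordsW lens r c d) fl idx := by
  induction lens with
  | nil => intro fl r c d idx; simp [pvCoordsW, pvW1]
  | cons L rest ih =>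
    intro fl r c d idx
    simp only [List.foldl_cons, pvStepB, pvInnerB_foldl, PySem.List.length_pyRange_one,
      sub_zero, pvCoordsW, pvW1_append, pvSeg_length, ih]


-- ==== segments as ranges ====
theorem pvSeg_right (t : Int) (k : Nat) : ∀ (a : Int),
    pvSeg t a 0 1 k = (PySem.List.pyRange a (a + k) 1).map (fun i => (t, i)) := by
  induction k with
  | zero =>
    intro a
    simp only [pvSeg, Nat.cast_zero, add_zero]
    rw [PySem.List.pyRange_one_eq_nil (le_refl a)]
    simp
  | succ k ih =>
    intro a
    push_cast
    rw [show a + ((k:Int)+1) = (a+1) + (k:Int) by ring,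
        PySem.List.pyRange_one_cons (a := a) (b := a + 1 + (k:Int)) (by omega)]
    simp only [List.map_cons, pvSeg, add_zero]
    rw [ih (a+1)]


theorem pvSeg_down (r : Int) (k : Nat) : ∀ (a : Int),
    pvSeg a r 1 0 k = (PySem.List.pyRange a (a + k) 1).map (fun i => (i, r)) := by
  induction k with
  | zero =>
    intro a
    simp only [pvSeg, Nat.cast_zero, add_zero]
    rw [PySem.List.pyRange_one_eq_nil (le_refl a)]
    simp
  | succ k ih =>
    intro a
    push_cast
    rw [show a + ((k:Int)+1) = (a+1) + (k:Int) by ring,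
        PySem.List.pyRange_one_cons (a := a) (b := a + 1 + (k:Int)) (by omega)]
    simp only [List.map_cons, pvSeg, add_zero]
    rw [ih (a+1)]


theorem pvSeg_left (b : Int) (k : Nat) : ∀ (a : Int),
    pvSeg b a 0 (-1) k = (PySem.List.pyRange a (a - k) (-1)).map (fun i => (b, i)) := by
  induction k with
  | zero =>
    intro a
    simp only [pvSeg, Nat.cast_zero, sub_zero]
    rw [PySem.List.pyRange_neg_one_eq_nil (le_refl a)]
    simp
  | succ k ih =>
    intro a
    push_cast
    rw [show a - ((k:Int)+1) = (a-1) - (k:Int) by ring,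
        PySem.List.pyRange_neg_one_cons (a := a) (b := a - 1 - (k:Int)) (by omega)]
    simp only [List.map_cons, pvSeg, add_zero]
    have h3 : a + -1 = a - 1 := by ring
    rw [h3, ih (a-1)]


theorem pvSeg_up (l : Int) (k : Nat) : ∀ (a : Int),
    pvSeg a l (-1) 0 k = (PySem.List.pyRange a (a - k) (-1)).map (fun i => (i, l)) := by
  induction k with
  | zero =>
    intro a
    simp only [pvSeg, Nat.cast_zero, sub_zero]
    rw [PySem.List.pyRange_neg_one_eq_nil (le_refl a)]
    simp
  | succ k ih =>
    intro a
    push_cast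
    rw [show a - ((k:Int)+1) = (a-1) - (k:Int) by ring,
        PySem.List.pyRange_neg_one_cons (a := a) (b := a - 1 - (k:Int)) (by omega)]
    simp only [List.map_cons, pvSeg, add_zero]
    have h3 : a + -1 = a - 1 := by ring
    rw [h3, ih (a-1)]


-- one ring of the walk: four segments, ending ready at the inner ring's start
theorem pvRing (m : Nat) (rest : List Int) (t l : Int) :
    pvCoordsW ((2*(m:Int)+3) :: (2*(m:Int)+2) :: (2*(m:Int)+2) :: (2*(m:Int)+1) :: rest) t l 0 =
      pvSeg t l 0 1 (2*m+3) ++ (pvSeg (t+1) (l+2*(m:Int)+2) 1 0 (2*m+2) ++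
      (pvSeg (t+2*(m:Int)+2) (l+2*(m:Int)+1) 0 (-1) (2*m+2) ++
      (pvSeg (t+2*(m:Int)+1) l (-1) 0 (2*m+1) ++
      pvCoordsW rest (t+1) (l+1) 0))) := by
  have hg0 : (PySem.List.pyGet? pvDirs 0).getD (0,0) = ((0 : Int), (1 : Int)) := by decide
  have hg1 : (PySem.List.pyGet? pvDirs 1).getD (0,0) = ((1 : Int), (0 : Int)) := by decide
  have hg2 : (PySem.List.pyGet? pvDirs 2).getD (0,0) = ((0 : Int), (-1 : Int)) := by decide
  have hg3 : (PySem.List.pyGet? pvDirs 3).getD (0,0) = ((-1 : Int), (0 : Int)) := by decide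
  have hd1 : PySem.Int.mod (0+1) 4 = 1 := by decide
  have hd2 : PySem.Int.mod (1+1) 4 = 2 := by decide
  have hd3 : PySem.Int.mod (2+1) 4 = 3 := by decide
  have hd4 : PySem.Int.mod (3+1) 4 = 0 := by decide
  have hk1 : ((2*(m:Int)+3)).toNat = 2*m+3 := by omega
  have hk2 : ((2*(m:Int)+2)).toNat = 2*m+2 := by omega
  have hk3 : ((2*(m:Int)+1)).toNat = 2*m+1 := by omega
  simp only [pvCoordsW, hg0, hg1, hg2, hg3, hd1, hd2, hd3, hd4, hk1, hk2, hk3]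
  push_cast
  ring_nf

-- ==== the geometry: A's boundary rings are B's segment walk ====
theorem pvGeom : ∀ (m fuel : Nat), m < fuel → ∀ (t l : Int),
    pvCoordsA fuel t (t + 2*m) l (l + 2*m) = pvCoordsW (pvLens (2*(m:Int)+1)) t l 0 := by
  intro m
  induction m with
  | zero =>
    intro fuel hf t l
    obtain ⟨f, rfl⟩ : ∃ f, fuel = f + 1 := ⟨fuel - 1, by omega⟩
    rw [pvCoordsA]
    simp only [Nat.cast_zero, mul_zero, add_zero, if_neg (lt_irrefl l)]
    rw [PySem.List.pyRange_one_singleton, if_pos (by omega)]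
    have h0 : pvLens 1 = [1] := by
      unfold pvLens
      rw [PySem.List.pyRange_neg_one_eq_nil (by omega)]
      norm_num
    norm_num [h0, pvCoordsW, pvSeg, pvDirs, PySem.List.pyGet?]
  | succ m ih =>
    intro fuel hf t l
    obtain ⟨f, rfl⟩ : ∃ f, fuel = f + 1 := ⟨fuel - 1, by omega⟩
    push_cast
    rw [pvCoordsA]
    rw [if_neg (by omega), if_neg (by omega), if_neg (by omega), if_neg (by omega)]
    have e1 : t + 2*((m:Int)+1) - 1 = (t+1) + 2*(m:Int) := by ring
    have e2 : l + 2*((m:Int)+1) - 1 = (l+1) + 2*(m:Int) := by ring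
    rw [e1, e2, ih f (by omega) (t+1) (l+1)]
    have hL : pvLens (2*((m:Int)+1)+1) =
        (2*(m:Int)+3) :: ((2*(m:Int)+2) :: ((2*(m:Int)+2) :: ((2*(m:Int)+1) ::
          pvLens (2*(m:Int)+1)))) := by
      rw [pvLens_step _ (by omega)]
      simp only [List.cons_append, List.nil_append, List.cons.injEq]
      refine ⟨by ring, by ring, by ring, by ring, ?_⟩
      rw [show (2*((m:Int)+1)+1-2) = 2*(m:Int)+1 by ring]
    rw [hL, pvRing, pvSeg_right, pvSeg_down, pvSeg_left, pvSeg_up]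
    push_cast
    ring_nf
    simp only [List.append_assoc]


-- ==== bounds ====
theorem pvBoundsA : ∀ (m fuel : Nat), m < fuel → ∀ (t l : Int) (p : Int × Int),
    p ∈ pvCoordsA fuel t (t + 2*m) l (l + 2*m) →
      t ≤ p.1 ∧ p.1 ≤ t + 2*m ∧ l ≤ p.2 ∧ p.2 ≤ l + 2*m := by
  intro m
  induction m with
  | zero =>
    intro fuel hf t l p hp
    obtain ⟨f, rfl⟩ : ∃ f, fuel = f + 1 := ⟨fuel - 1, by omega⟩
    rw [pvCoordsA] at hp
    simp only [Nat.cast_zero, mul_zero, add_zero, if_neg (lt_irrefl l)] at hp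
    rw [PySem.List.pyRange_one_singleton, if_pos (by omega)] at hp
    simp only [List.map_cons, List.map_nil, List.mem_singleton] at hp
    subst hp
    norm_num
  | succ m ih =>
    intro fuel hf t l p hp
    obtain ⟨f, rfl⟩ : ∃ f, fuel = f + 1 := ⟨fuel - 1, by omega⟩
    push_cast at hp ⊢
    rw [pvCoordsA] at hp
    rw [if_neg (by omega), if_neg (by omega), if_neg (by omega), if_neg (by omega)] at hp
    have e1 : t + 2*((m:Int)+1) - 1 = (t+1) + 2*(m:Int) := by ring
    have e2 : l + 2*((m:Int)+1) - 1 = (l+1) + 2*(m:Int) := by ring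
    rw [e1, e2] at hp
    simp only [List.mem_append, List.mem_map, PySem.List.mem_pyRange_one,
      PySem.List.mem_pyRange_neg_one] at hp
    rcases hp with ((((⟨i, hi, rfl⟩ | ⟨i, hi, rfl⟩) | ⟨i, hi, rfl⟩) | ⟨i, hi, rfl⟩) | hp)
    · refine ⟨?_, ?_, ?_, ?_⟩ <;> simp <;> omega
    · refine ⟨?_, ?_, ?_, ?_⟩ <;> simp <;> omega
    · refine ⟨?_, ?_, ?_, ?_⟩ <;> simp <;> omega
    · refine ⟨?_, ?_, ?_, ?_⟩ <;> simp <;> omega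
    · have := ih f (by omega) (t+1) (l+1) p hp
      push_cast at this
      omega


-- ==== matrix / flat bridge ====
theorem pvFlatten_set (nN : Nat) : ∀ (m : List (List (Option Char))) (i j : Nat)
    (_ : ∀ row ∈ m, row.length = nN) (_ : j < nN) (v : Option Char),
    (m.set i ((m.getD i []).set j v)).flatten = m.flatten.set (i * nN + j) v := by
  intro m
  induction m with
  | nil => intro i j _ _ v; simp
  | cons row rest ih =>
    intro i j hrows hj v
    cases i with
    | zero =>
      have hrow : row.length = nN := hrows row (by simp)
      simp only [List.getD_cons_zero, List.set_cons_zero, List.flatten_cons, Nat.zero_mul,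
        Nat.zero_add]
      rw [List.set_append_left _ _ (by omega)]
    | succ i =>
      have hrow : row.length = nN := hrows row (by simp)
      have h5 : (i + 1) * nN = i * nN + nN := by ring
      simp only [List.getD_cons_succ, List.set_cons_succ, List.flatten_cons]
      rw [ih i j (fun r hr => hrows r (by simp [hr])) hj v,
        List.set_append_right _ _ (by omega)]
      have h6 : (i + 1) * nN + j - row.length = i * nN + j := by omega
      rw [h6]


theorem pvBridge (f : Int → Char) (nN : Nat) (coords : List (Int × Int)) :
    ∀ (m : List (List (Option Char))) (idx : Int),
      (∀ row ∈ m, row.length = nN) →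
      (∀ p ∈ coords, 0 ≤ p.1 ∧ 0 ≤ p.2 ∧ p.2 < (nN : Int)) →
      (pvW2 f coords m idx).flatten = pvW1 f (nN : Int) coords m.flatten idx := by
  induction coords with
  | nil => intro m idx _ _; rfl
  | cons p rest ih =>
    obtain ⟨r, c⟩ := p
    intro m idx hrows hb
    obtain ⟨hr, hc, hcn⟩ := hb (r, c) (by simp)
    simp only [pvW2, pvW1, pvSetCell]
    have hidx : (r * (nN : Int) + c).toNat = r.toNat * nN + c.toNat := by
      rw [Int.toNat_add (mul_nonneg hr (by positivity)) hc,
        Int.toNat_mul hr (by positivity)]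
      simp
    have hshape : ∀ row ∈ m.set r.toNat ((m.getD r.toNat []).set c.toNat (some (f idx))),
        row.length = nN := by
      by_cases hlen : r.toNat < m.length
      · intro row hrow
        rcases List.mem_or_eq_of_mem_set hrow with h | h
        · exact hrows row h
        · subst h
          rw [List.length_set, List.getD_eq_getElem m [] hlen]
          exact hrows _ (List.getElem_mem hlen)
      · rw [List.set_eq_of_length_le (by omega)]
        exact hrows
    rw [ih _ (idx + 1) hshape (fun q hq => hb q (by simp [hq])),
      pvFlatten_set nN m r.toNat c.toNat hrows (by omega) _, hidx]

theorem pvFlattenRep (a b : Nat) (x : Option Char) :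
    (List.replicate a (List.replicate b x)).flatten = List.replicate (a * b) x := by
  induction a with
  | zero => simp
  | succ a ih =>
    simp only [List.replicate_succ, List.flatten_cons, ih, Nat.succ_mul, Nat.add_comm]
    rw [← List.replicate_add]

-- ===== VERDICT (by name: the statement is the Claim_ definition above) =====
theorem spiral_encrypt_spec : Claim_equal_spiral_encrypt := by
  unfold Claim_equal_spiral_encrypt
  intro arr _
  unfold Spec_spiral_encrypt
  have hsq : Nat.sqrt arr.toList.length * Nat.sqrt arr.toList.length ≤ arr.toList.length :=
    Nat.sqrt_le arr.toList.length
  have hu : (if Nat.sqrt arr.toList.length * Nat.sqrt arr.toList.length < arr.toList.length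
        then (Nat.sqrt arr.toList.length : Int) + 1 else (Nat.sqrt arr.toList.length : Int)) =
      (if Nat.sqrt arr.toList.length * Nat.sqrt arr.toList.length = arr.toList.length
        then (Nat.sqrt arr.toList.length : Int) else (Nat.sqrt arr.toList.length : Int) + 1) := by
    rcases eq_or_lt_of_le hsq with h | h
    · rw [if_neg (by omega), if_pos h]
    · rw [if_pos h, if_neg (by omega)]
  have hOB : (if PySem.Int.mod (if Nat.sqrt arr.toList.length * Nat.sqrt arr.toList.length <
          arr.toList.length then (Nat.sqrt arr.toList.length : Int) + 1
          else (Nat.sqrt arr.toList.length : Int)) 2 = 0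
        then (if Nat.sqrt arr.toList.length * Nat.sqrt arr.toList.length < arr.toList.length
          then (Nat.sqrt arr.toList.length : Int) + 1 else (Nat.sqrt arr.toList.length : Int)) + 1
        else (if Nat.sqrt arr.toList.length * Nat.sqrt arr.toList.length < arr.toList.length
          then (Nat.sqrt arr.toList.length : Int) + 1 else (Nat.sqrt arr.toList.length : Int))) =
      pvOrde arr := by
    simp only [pvOrde]
    rw [hu]
  obtain ⟨m, hm⟩ : ∃ m : Nat, pvOrde arr = 2*(m:Int)+1 := by
    simp only [pvOrde]
    have hmod : PySem.Int.mod (if Nat.sqrt arr.toList.length * Nat.sqrt arr.toList.length =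
          arr.toList.length then (Nat.sqrt arr.toList.length : Int)
          else (Nat.sqrt arr.toList.length : Int) + 1) 2 =
        (if Nat.sqrt arr.toList.length * Nat.sqrt arr.toList.length = arr.toList.length
          then (Nat.sqrt arr.toList.length : Int)
          else (Nat.sqrt arr.toList.length : Int) + 1) % 2 :=
      PySem.Int.mod_eq_emod_of_pos (by norm_num)
    rw [hmod]
    by_cases hA : Nat.sqrt arr.toList.length * Nat.sqrt arr.toList.length = arr.toList.length <;>
      [rw [if_pos hA]; rw [if_neg hA]] <;>
      [by_cases hp : (Nat.sqrt arr.toList.length : Int) % 2 = 0;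
       by_cases hp : ((Nat.sqrt arr.toList.length : Int) + 1) % 2 = 0] <;>
      [exact ⟨Nat.sqrt arr.toList.length / 2, by rw [if_pos hp]; omega⟩;
       exact ⟨Nat.sqrt arr.toList.length / 2, by rw [if_neg hp]; omega⟩;
       exact ⟨(Nat.sqrt arr.toList.length + 1) / 2, by rw [if_pos hp]; omega⟩;
       exact ⟨(Nat.sqrt arr.toList.length + 1) / 2, by rw [if_neg hp]; omega⟩]
  simp only [spiral_encrypt, spiral_encrypt_alt, pvCek, pvEncryptPadding]
  rw [hOB, hm]
  have hk : ((2*(m:Int)+1)).toNat = 2*m+1 := by omega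
  rw [hk, pvLoopA_eq]
  rw [show (2*(m:Int)+1) - 1 = 0 + 2*(m:Int) from by ring]
  rw [show 2*m+1+1 = 2*m+2 from rfl]
  rw [pvGeom m (2*m+2) (by omega) 0 0]
  rw [← List.filterMap_flatten]
  have hshape : ∀ row ∈ List.replicate (2*m+1) (List.replicate (2*m+1) (none : Option Char)),
      row.length = 2*m+1 := by
    intro row hrow
    rw [List.eq_of_mem_replicate hrow, List.length_replicate]
  have hbounds : ∀ p ∈ pvCoordsW (pvLens (2*(m:Int)+1)) 0 0 0,
      0 ≤ p.1 ∧ 0 ≤ p.2 ∧ p.2 < ((2*m+1 : Nat) : Int) := by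
    intro p hp
    rw [← pvGeom m (2*m+2) (by omega) 0 0] at hp
    have := pvBoundsA m (2*m+2) (by omega) 0 0 p hp
    push_cast
    omega
  rw [pvBridge _ (2*m+1) _ _ _ hshape hbounds]
  rw [pvFlattenRep]
  rw [pvStepB_foldl]
  have hlens : (2*(m:Int)+1) ::
      (PySem.List.pyRange (0 + 2*(m:Int)) 0 (-1)).flatMap (fun k => [k, k]) =
      pvLens (2*(m:Int)+1) := by
    unfold pvLens
    rw [show (2*(m:Int)+1-1) = 0 + 2*(m:Int) from by ring]
  rw [hlens]
  have hflat : ((2*(m:Int)+1) * (2*(m:Int)+1)).toNat = (2*m+1) * (2*m+1) := by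
    rw [show (2*(m:Int)+1) = ((2*m+1 : Nat) : Int) from by push_cast; ring,
      ← Nat.cast_mul, Int.toNat_natCast]
  rw [hflat]
  push_cast
  rfl
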